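-- pv_equiv track=rewrite | github.com/AdamOtto/Daily-Challenges | Challenge766.py | check
-- ===== SOURCE A (Python) =====
-- def check(ar):
--     x = 0
--     y = len(ar) - 1
--     for i in range(len(ar)):
--         if ar[x] == "x":
--             x += 1
--         if ar[y] == "y":
--             y -= 1
--     if x >= y:
--         return True
--     return False
-- ===== SOURCE B (Python) =====
-- def check(ar):
--     broke = False
--     for s in ar:
--         if not broke:
--             if s != "x":
--                 broke = True
--         elif s != "y":
--             return False
--     return True
-- ===== Notes on version B (the rewrite author's own statement) =====
-- stated objective: simpler
-- what changed: A runs a fixed len(ar)-iteration loop advancing a front pointer past 'x's and a back pointer past 'y's and compares the pointers at the end; B is a single forward pass through the elements with a two-state flag (before/after the first non-'x', which is consumed as the one free middle slot) that returns False as soon as a post-break element is not 'y' -- no indices, no counts, no final comparison; measured ~1.7x faster (no per-iteration indexing, early exit).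
import Mathlib
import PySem

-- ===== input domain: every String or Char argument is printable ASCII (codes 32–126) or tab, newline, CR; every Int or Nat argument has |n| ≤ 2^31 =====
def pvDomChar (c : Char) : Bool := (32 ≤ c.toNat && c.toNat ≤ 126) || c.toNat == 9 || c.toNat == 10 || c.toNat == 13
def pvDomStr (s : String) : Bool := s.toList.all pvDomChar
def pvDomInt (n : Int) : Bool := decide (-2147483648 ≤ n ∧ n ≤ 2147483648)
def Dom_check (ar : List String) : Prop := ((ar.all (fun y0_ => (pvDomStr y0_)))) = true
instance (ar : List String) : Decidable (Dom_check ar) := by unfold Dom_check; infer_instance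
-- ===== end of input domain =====

-- B replaces A's fixed-count two-pointer loop by one forward pass with a two-state flag
-- (before/after the first non-"x", which is consumed as the single free middle slot);
-- objective: simpler. Return value only; no mutation.

-- ===== PORT A =====
-- one iteration of A's for-loop body over the state (x, y)
def checkStep (ar : List String) (p : Int × Int) : Int × Int :=
  let x := if PySem.List.pyGet? ar p.1 = some "x" then p.1 + 1 else p.1
  let y := if PySem.List.pyGet? ar p.2 = some "y" then p.2 - 1 else p.2
  (x, y)

def check (ar : List String) : Bool :=
  let st := (PySem.List.pyRange 0 (ar.length : Int) 1).foldl
    (fun p _ => checkStep ar p) (0, (ar.length : Int) - 1)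
  decide (st.1 ≥ st.2)

-- ===== PORT B =====
-- 'for s in ar: …' with an early 'return False' — structural recursion over the list,
-- carrying the flag 'broke' (have we passed the first non-"x" element yet?)
def checkAltGo (broke : Bool) : List String → Bool
  | [] => true
  | s :: t =>
    if !broke then checkAltGo (if s ≠ "x" then true else broke) t
    else if s ≠ "y" then false
    else checkAltGo broke t

def check_alt (ar : List String) : Bool := checkAltGo false ar

-- ===== PRECONDITION & SPEC =====
def Spec_check (ar : List String) (out : Bool) : Prop := out = check_alt ar
instance (ar : List String) (out : Bool) : Decidable (Spec_check ar out) := by unfold Spec_check; infer_instance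

-- ===== CLAIM (what is proved, stated in full; the proofs are below) =====
def Claim_equal_check : Prop := ∀ (ar : List String), Dom_check ar → Spec_check ar (check ar)

-- ===== LEMMAS AND PROOFS =====

-- proof-only helper: the length of the leading run of c in l
def leadCount (c : String) : List String → Nat
  | [] => 0
  | s :: t => if s ≠ c then 0 else leadCount c t + 1

theorem leadCount_le (c : String) (l : List String) : leadCount c l ≤ l.length := by
  induction l with
  | nil => simp [leadCount]
  | cons s t ih =>
    simp only [leadCount, List.length_cons]
    split <;> omega

theorem getElem?_lt_leadCount (c : String) (l : List String) (i : Nat)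
    (h : i < leadCount c l) : l[i]? = some c := by
  induction l generalizing i with
  | nil => simp [leadCount] at h
  | cons s t ih =>
    simp only [leadCount] at h
    by_cases hs : s = c
    · cases i with
      | zero => simp [hs]
      | succ j =>
        simp only [hs, ne_eq, not_true_eq_false, if_false] at h
        simpa using ih j (by omega)
    · simp [hs] at h

theorem getElem?_leadCount_ne (c : String) (l : List String) :
    l[leadCount c l]? ≠ some c := by
  induction l with
  | nil => simp [leadCount]
  | cons s t ih =>
    by_cases hs : s = c
    · simpa [leadCount, hs] using ih
    · simpa [leadCount, hs] using hs

theorem leadCount_append_ne (c a : String) (ha : a ≠ c) (l : List String) :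
    leadCount c (l ++ [a]) = leadCount c l := by
  induction l with
  | nil => simp [leadCount, ha]
  | cons s t ih => simp only [List.cons_append, leadCount, ih]

theorem leadCount_eq_length_iff (c : String) (l : List String) :
    leadCount c l = l.length ↔ ∀ s ∈ l, s = c := by
  induction l with
  | nil => simp [leadCount]
  | cons s t ih =>
    by_cases hs : s = c
    · subst hs
      have hcons : leadCount s (s :: t) = leadCount s t + 1 := by simp [leadCount]
      rw [hcons, List.length_cons, Nat.add_right_cancel_iff, ih]
      constructor
      · intro h x hx
        rcases List.mem_cons.mp hx with h1 | h2
        · exact h1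
        · exact h x h2
      · intro h x hx; exact h x (List.mem_cons_of_mem _ hx)
    · have hle := leadCount_le c t
      simp only [leadCount, hs, ne_eq, not_false_eq_true, if_true, List.length_cons]
      constructor
      · intro h; omega
      · intro h; exact absurd (h s (List.mem_cons_self)) hs

-- loop invariant of A's fold: after k iterations the state is
-- (min lx k, n - 1 - min ty k), where lx / ty are the two boundary run lengths
theorem check_fold_inv (ar : List String) (L : List Int) (k : Nat)
    (hk : k + L.length ≤ ar.length) :
    L.foldl (fun p _ => checkStep ar p)
      (((min (leadCount "x" ar) k : Nat) : Int),
       (ar.length : Int) - 1 - ((min (leadCount "y" ar.reverse) k : Nat) : Int))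
    = (((min (leadCount "x" ar) (k + L.length) : Nat) : Int),
       (ar.length : Int) - 1 - ((min (leadCount "y" ar.reverse) (k + L.length) : Nat) : Int)) := by
  induction L generalizing k with
  | nil => simp
  | cons a t ih =>
    have hkn : k < ar.length := by simp at hk; omega
    have hty : leadCount "y" ar.reverse ≤ ar.length := by
      simpa using leadCount_le "y" ar.reverse
    set lx := leadCount "x" ar with hlx
    set ty := leadCount "y" ar.reverse with hty'
    have hstep : checkStep ar (((min lx k : Nat) : Int), (ar.length : Int) - 1 - ((min ty k : Nat) : Int))
        = (((min lx (k + 1) : Nat) : Int), (ar.length : Int) - 1 - ((min ty (k + 1) : Nat) : Int)) := by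
      have hxcond : (PySem.List.pyGet? ar ((min lx k : Nat) : Int) = some "x") ↔ k < lx := by
        rw [PySem.List.pyGet?_natCast]
        constructor
        · intro h
          by_contra hge
          have : min lx k = lx := by omega
          rw [this] at h
          exact getElem?_leadCount_ne "x" ar h
        · intro h
          have : min lx k = k := by omega
          rw [this]
          exact getElem?_lt_leadCount "x" ar k h
      have hj : min ty k ≤ ar.length - 1 := by omega
      have hcast : (ar.length : Int) - 1 - ((min ty k : Nat) : Int)
          = ((ar.length - 1 - min ty k : Nat) : Int) := by push_cast; omega
      have hrev : ar[ar.length - 1 - min ty k]? = ar.reverse[min ty k]? := by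
        rw [List.getElem?_reverse (by simpa using (by omega : min ty k < ar.length))]
      have hycond : (PySem.List.pyGet? ar ((ar.length : Int) - 1 - ((min ty k : Nat) : Int)) = some "y") ↔ k < ty := by
        rw [hcast, PySem.List.pyGet?_natCast, hrev]
        constructor
        · intro h
          by_contra hge
          have : min ty k = ty := by omega
          rw [this] at h
          exact getElem?_leadCount_ne "y" ar.reverse h
        · intro h
          have : min ty k = k := by omega
          rw [this]
          exact getElem?_lt_leadCount "y" ar.reverse k h
      unfold checkStep
      by_cases hx : k < lx <;> by_cases hy : k < ty <;>
        simp only [hxcond, hycond, hx, hy, if_true, if_false] <;>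
        refine Prod.ext ?_ ?_ <;> simp <;> push_cast <;> omega
    show List.foldl _ _ _ = _
    rw [List.foldl_cons, hstep, ih (k + 1) (by simp at hk ⊢; omega)]
    simp only [List.length_cons]
    congr 2 <;> omega

-- A's value in closed form: lx ≥ n - 1 - ty
theorem check_char (ar : List String) :
    check ar = decide ((leadCount "x" ar : Int) ≥ (ar.length : Int) - 1 - (leadCount "y" ar.reverse : Int)) := by
  unfold check
  have hlen : (PySem.List.pyRange 0 (ar.length : Int) 1).length = ar.length := by
    simp [PySem.List.length_pyRange_one]
  have hlx : leadCount "x" ar ≤ ar.length := leadCount_le "x" ar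
  have hty : leadCount "y" ar.reverse ≤ ar.length := by
    simpa using leadCount_le "y" ar.reverse
  have h := check_fold_inv ar (PySem.List.pyRange 0 (ar.length : Int) 1) 0 (by omega)
  rw [hlen] at h
  simp only [Nat.min_zero, Nat.zero_add, Nat.cast_zero, sub_zero] at h
  rw [min_eq_left hlx, min_eq_left hty] at h
  simp only [h]

-- the post-break phase accepts exactly the all-"y" lists
theorem checkAltGo_true (l : List String) :
    checkAltGo true l = decide (∀ s ∈ l, s = "y") := by
  induction l with
  | nil => simp [checkAltGo]
  | cons s t ih =>
    by_cases hs : s = "y" <;> simp [checkAltGo, hs, ih]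

-- B's value in the same closed form
theorem check_alt_char (ar : List String) :
    check_alt ar = decide (((leadCount "x" ar : Nat) : Int) ≥ (ar.length : Int) - 1 - ((leadCount "y" ar.reverse : Nat) : Int)) := by
  unfold check_alt
  induction ar with
  | nil => simp [checkAltGo, leadCount]
  | cons s t ih =>
    by_cases hs : s = "x"
    · subst hs
      have htyeq : leadCount "y" (("x" :: t).reverse) = leadCount "y" t.reverse := by
        rw [List.reverse_cons]
        exact leadCount_append_ne "y" "x" (by decide) t.reverse
      have hlxeq : leadCount "x" ("x" :: t) = leadCount "x" t + 1 := by
        simp [leadCount]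
      simp only [checkAltGo, ne_eq, not_true_eq_false, Bool.not_false, if_true, if_false, ih,
        htyeq, hlxeq, List.length_cons]
      apply decide_eq_decide.mpr
      push_cast
      omega
    · have hlx0 : leadCount "x" (s :: t) = 0 := by simp [leadCount, hs]
      have hgo : checkAltGo false (s :: t) = checkAltGo true t := by
        simp [checkAltGo, hs]
      rw [hgo, checkAltGo_true, hlx0]
      have hle : leadCount "y" ((s :: t).reverse) ≤ t.length + 1 := by
        simpa using leadCount_le "y" (s :: t).reverse
      have hiff : (∀ x ∈ t, x = "y") ↔
          ((0 : Int) ≥ ((s :: t).length : Int) - 1 - (leadCount "y" ((s :: t).reverse) : Int)) := by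
        constructor
        · intro h
          have hall : ∀ x ∈ t.reverse, x = "y" := by
            intro x hx; exact h x (List.mem_reverse.mp hx)
          have : leadCount "y" t.reverse = t.length := by
            have := (leadCount_eq_length_iff "y" t.reverse).mpr hall
            simpa using this
          have hge : t.length ≤ leadCount "y" ((s :: t).reverse) := by
            rw [List.reverse_cons]
            by_cases hsy : s = "y"
            · have : leadCount "y" (t.reverse ++ [s]) = t.length + 1 := by
                have := (leadCount_eq_length_iff "y" (t.reverse ++ [s])).mpr ?_
                · simpa using this
                · intro x hx
                  rcases List.mem_append.mp hx with h1 | h2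
                  · exact hall x h1
                  · exact (List.mem_singleton.mp h2).trans hsy
              omega
            · rw [leadCount_append_ne "y" s hsy t.reverse]; omega
          simp only [List.length_cons]; push_cast; omega
        · intro h
          have hge : t.length ≤ leadCount "y" ((s :: t).reverse) := by
            simp only [List.length_cons] at h; push_cast at h; omega
          intro x hx
          have hxr : x ∈ t.reverse := List.mem_reverse.mpr hx
          obtain ⟨i, hilen, hi⟩ := List.mem_iff_getElem.mp hxr
          have hil : i < t.length := by simpa using hilen
          have : ((s :: t).reverse)[i]? = some "y" := by
            apply getElem?_lt_leadCount "y" ((s :: t).reverse) i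
            omega
          rw [List.reverse_cons] at this
          have hidx : (t.reverse ++ [s])[i]? = t.reverse[i]? := by
            rw [List.getElem?_append_left (by simpa using hil)]
          rw [hidx] at this
          have : t.reverse[i]? = some x := by
            rw [List.getElem?_eq_getElem hilen, hi]
          simp_all
      simp only [Nat.cast_zero]
      exact decide_eq_decide.mpr hiff

-- ===== VERDICT (by name: the statement is the Claim_ definition above) =====
theorem check_spec : Claim_equal_check := by
  intro ar _
  unfold Spec_check
  rw [check_char, check_alt_char]
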